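-- pv_equiv track=rewrite | github.com/MartinOrz/exhentai | downloader/tools.py | resort
-- ===== SOURCE A (Python) =====
-- def resort(result):
--     _dic = {}
--     for k in result:
--         if k[3] not in _dic:
--             _dic[k[3]] = [k]
--         else:
--             _dic[k[3]].append(k)
--         result = []
--     urls = {}
--     for k in sorted(_dic.keys(), reverse=True):
--         for u in _dic[k]:
--             if u[0] not in urls:
--                 result.append((u[0], u[1], u[2], k))
--                 urls[u[0]] = 1
--     return result
-- ===== SOURCE B (Python) =====
-- def resort(result):
--     out = []
--     seen = set()
--     for u in sorted(result, key=lambda x: x[3], reverse=True):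
--         if u[0] not in seen:
--             out.append((u[0], u[1], u[2], u[3]))
--             seen.add(u[0])
--     return out
-- ===== Notes on version B (the rewrite author's own statement) =====
-- stated objective: simpler
-- what changed: Replaced the group-by-key dict plus per-key traversal with one stable descending sort of the whole list followed by a single first-seen dedup pass over it.
import Mathlib
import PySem

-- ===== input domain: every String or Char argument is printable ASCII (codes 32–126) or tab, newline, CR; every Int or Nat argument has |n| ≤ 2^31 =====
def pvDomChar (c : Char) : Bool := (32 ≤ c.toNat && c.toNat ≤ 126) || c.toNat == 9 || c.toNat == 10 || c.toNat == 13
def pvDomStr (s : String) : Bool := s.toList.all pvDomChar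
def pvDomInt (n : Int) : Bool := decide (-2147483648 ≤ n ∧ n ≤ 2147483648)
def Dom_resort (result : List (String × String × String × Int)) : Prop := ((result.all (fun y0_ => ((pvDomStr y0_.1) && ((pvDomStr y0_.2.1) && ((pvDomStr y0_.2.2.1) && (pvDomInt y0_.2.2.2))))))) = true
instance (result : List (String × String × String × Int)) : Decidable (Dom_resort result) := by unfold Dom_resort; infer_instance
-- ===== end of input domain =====

-- B replaces A's group-by-key dict + per-key traversal by one stable descending sort of the
-- whole list followed by a single first-seen dedup pass (objective: simpler).

-- ===== PORT A =====
def resort (result : List (String × String × String × Int)) : List (String × String × String × Int) :=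
  let dic : PySem.Dict Int (List (String × String × String × Int)) :=
    result.foldl (fun d k =>
      if !(d.contains k.2.2.2) then d.insert k.2.2.2 [k]
      else d.modify k.2.2.2 [] (fun l => l ++ [k])) PySem.Dict.empty
  -- Python's 'result = []' inside the first loop clears the list; the second phase rebuilds from []
  (((PySem.List.sorted dic.keys (fun x => x) true).foldl
      (fun (st : List (String × String × String × Int) × PySem.Dict String Int) k =>
        (dic.getD k []).foldl
          (fun st u =>
            if !(st.2.contains u.1) then (st.1 ++ [(u.1, u.2.1, u.2.2.1, k)], st.2.insert u.1 1)
            else st) st)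
      ([], PySem.Dict.empty))).1

-- ===== PORT B =====
def resort_alt (result : List (String × String × String × Int)) : List (String × String × String × Int) :=
  (((PySem.List.sorted result (fun x => x.2.2.2) true).foldl
      (fun (st : List (String × String × String × Int) × PySem.Set String) u =>
        if !(PySem.Set.contains st.2 u.1) then (st.1 ++ [(u.1, u.2.1, u.2.2.1, u.2.2.2)], PySem.Set.add st.2 u.1)
        else st)
      ([], PySem.Set.empty))).1

-- ===== PRECONDITION & SPEC =====
def Spec_resort (result : List (String × String × String × Int)) (out : List (String × String × String × Int)) : Prop := out = resort_alt result
instance (result : List (String × String × String × Int)) (out : List (String × String × String × Int)) : Decidable (Spec_resort result out) := by unfold Spec_resort; infer_instance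

-- ===== CLAIM (what is proved, stated in full; the proofs are below) =====
def Claim_equal_resort : Prop := ∀ (result : List (String × String × String × Int)), Dom_resort result → Spec_resort result (resort result)

-- ===== LEMMAS AND PROOFS =====

theorem pvKeysInsert {κ ν : Type} [BEq κ] [LawfulBEq κ] (d : PySem.Dict κ ν) (k : κ) (v : ν) :
    (d.insert k v).keys = if d.contains k then d.keys else d.keys ++ [k] := by
  by_cases h : d.contains k = true
  · simp only [PySem.Dict.insert, PySem.Dict.keys, h, if_true]
    rw [List.map_map]
    apply List.map_congr_left
    intro p _
    by_cases hp : (p.1 == k) = true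
    · simp [Function.comp, eq_of_beq hp]
    · simp [Function.comp, hp]
  · simp only [PySem.Dict.insert, PySem.Dict.keys, h, if_false, Bool.false_eq_true]
    simp [List.map_append]

theorem pvGetDNotContains {κ ν : Type} [BEq κ] [LawfulBEq κ] (d : PySem.Dict κ ν) (k : κ) (dflt : ν)
    (h : d.contains k = false) : d.getD k dflt = dflt := by
  simp only [PySem.Dict.getD, PySem.Dict.get?]
  have hf : d.items.find? (fun p => p.1 == k) = none := by
    rw [List.find?_eq_none]
    intro p hp
    simp only [PySem.Dict.contains] at h
    rw [List.any_eq_false] at h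
    exact h p hp
  simp [hf]

theorem pvDicGetD (result : List (String × String × String × Int)) (c : Int) :
    (result.foldl (fun d k =>
      if !(d.contains k.2.2.2) then d.insert k.2.2.2 [k]
      else d.modify k.2.2.2 [] (fun l => l ++ [k])) PySem.Dict.empty).getD c []
    = result.filter (fun x => x.2.2.2 == c) := by
  have hstep : (fun (d : PySem.Dict Int (List (String × String × String × Int))) k =>
      if !(d.contains k.2.2.2) then d.insert k.2.2.2 [k]
      else d.modify k.2.2.2 [] (fun l => l ++ [k]))
      = fun d k => d.modify k.2.2.2 [] (fun l => l ++ [k]) := by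
    funext d k
    by_cases h : d.contains k.2.2.2 = true
    · simp [h]
    · simp only [Bool.not_eq_true] at h
      simp [h, PySem.Dict.modify, pvGetDNotContains d _ _ h]
  rw [hstep]
  have hmap : result.foldl (fun d k => d.modify k.2.2.2 [] (fun l => l ++ [k])) PySem.Dict.empty
      = (result.map (fun x => (x.2.2.2, x))).foldl
          (fun d p => d.modify p.1 [] (fun l => l ++ [p.2])) PySem.Dict.empty := by
    rw [List.foldl_map]
  rw [hmap, PySem.Dict.getD_foldl_modify_append]
  have hempty : (PySem.Dict.empty : PySem.Dict Int (List (String × String × String × Int))).getD c [] = [] := rfl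
  rw [hempty, List.filter_map]
  simp [Function.comp_def]

theorem pvDicKeys (result : List (String × String × String × Int)) :
    (result.foldl (fun d k =>
      if !(d.contains k.2.2.2) then d.insert k.2.2.2 [k]
      else d.modify k.2.2.2 [] (fun l => l ++ [k])) PySem.Dict.empty).keys
    = PySem.Set.ofList (result.map (fun x => x.2.2.2)) := by
  have hgen : ∀ (l : List (String × String × String × Int))
      (d : PySem.Dict Int (List (String × String × String × Int))),
      (l.foldl (fun d k =>
        if !(d.contains k.2.2.2) then d.insert k.2.2.2 [k]
        else d.modify k.2.2.2 [] (fun l => l ++ [k])) d).keys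
      = (l.map (fun x => x.2.2.2)).foldl PySem.Set.add d.keys := by
    intro l
    induction l with
    | nil => intro d; rfl
    | cons a t ih =>
      intro d
      rw [List.foldl_cons, List.map_cons, List.foldl_cons, ih]
      congr 1
      by_cases h : d.contains a.2.2.2 = true
      · have hm : a.2.2.2 ∈ d.keys := (PySem.Dict.contains_iff_mem_keys d _).1 h
        simp [h, PySem.Dict.modify, pvKeysInsert, PySem.Set.add_of_mem hm]
      · have hm : a.2.2.2 ∉ d.keys := fun hm => by
          rw [(PySem.Dict.contains_iff_mem_keys d _)] at h; exact h hm
        simp [h, pvKeysInsert, PySem.Set.add_of_not_mem hm]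
  rw [hgen, PySem.Set.ofList_eq_foldl]
  rfl

theorem pvPhase2 : ∀ (L : List (String × String × String × Int))
    (out : List (String × String × String × Int)) (d : PySem.Dict String Int) (s : PySem.Set String),
    d.keys = s →
    (L.foldl (fun st u =>
        if !(st.2.contains u.1) then (st.1 ++ [(u.1, u.2.1, u.2.2.1, u.2.2.2)], st.2.insert u.1 1)
        else st) (out, d)).1
    = (L.foldl (fun st u =>
        if !(PySem.Set.contains st.2 u.1) then (st.1 ++ [(u.1, u.2.1, u.2.2.1, u.2.2.2)], PySem.Set.add st.2 u.1)
        else st) (out, s)).1 := by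
  intro L
  induction L with
  | nil => intro out d s hs; rfl
  | cons u t ih =>
    intro out d s hs
    rw [List.foldl_cons, List.foldl_cons]
    by_cases h : d.contains u.1 = true
    · have hm : u.1 ∈ s := hs ▸ (PySem.Dict.contains_iff_mem_keys d _).1 h
      have hsc : PySem.Set.contains s u.1 = true := by
        simpa [PySem.Set.contains] using hm
      simp only [h, hsc, Bool.not_true, Bool.false_eq_true, if_false]
      exact ih out d s hs
    · have hm : u.1 ∉ s := fun hm => h ((PySem.Dict.contains_iff_mem_keys d _).2 (by rw [hs]; exact hm))
      have hsc : PySem.Set.contains s u.1 = false := by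
        simp [PySem.Set.contains]; exact hm
      simp only [h, hsc, Bool.not_false, if_true]
      apply ih
      rw [pvKeysInsert, if_neg (by simp [h]), hs, PySem.Set.add_of_not_mem hm]

theorem pvInsertBySkip {α : Type} (before : α → α → Bool) (x : α) (l1 l2 : List α)
    (h : ∀ y ∈ l1, before x y = false) :
    PySem.List.insertBy before x (l1 ++ l2) = l1 ++ PySem.List.insertBy before x l2 := by
  induction l1 with
  | nil => simp
  | cons y t ih =>
    have hy : before x y = false := h y (by simp)
    simp only [List.cons_append, PySem.List.insertBy, hy, Bool.false_eq_true, if_false]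
    rw [ih (fun z hz => h z (by simp [hz]))]
theorem pvInsertByFront {α : Type} (before : α → α → Bool) (x : α) (l : List α)
    (h : ∀ y ∈ l, before x y = true) :
    PySem.List.insertBy before x l = x :: l := by
  cases l with
  | nil => rfl
  | cons y t => simp [PySem.List.insertBy, h y (by simp)]
theorem pvDropWhileLe (v : Int) (S : List Int) (hp : S.Pairwise (fun a b => b < a)) :
    ∀ k ∈ S.dropWhile (fun k => decide (v < k)), k ≤ v := by
  induction S with
  | nil => simp
  | cons h t ih =>
    intro k hk
    rw [List.pairwise_cons] at hp
    by_cases hv : v < h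
    · rw [List.dropWhile_cons_of_pos (by simpa using hv)] at hk
      exact ih hp.2 k hk
    · rw [List.dropWhile_cons_of_neg (by simpa using hv)] at hk
      rcases List.mem_cons.mp hk with rfl | hk
      · omega
      · have := hp.1 k hk; omega
theorem pvInsertGrouped {α : Type} (key : α → Int) (xs : List α) (x : α) (S1 S2 : List Int)
    (h1 : ∀ k ∈ S1, key x ≤ k) (h2 : ∀ k ∈ S2, k < key x) :
    PySem.List.insertBy (fun a b => decide (key b < key a)) x
      (S1.flatMap (fun k => xs.filter (fun y => key y == k)) ++
       S2.flatMap (fun k => xs.filter (fun y => key y == k)))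
    = S1.flatMap (fun k => xs.filter (fun y => key y == k)) ++
      x :: S2.flatMap (fun k => xs.filter (fun y => key y == k)) := by
  rw [pvInsertBySkip]
  · rw [pvInsertByFront]
    intro y hy
    rw [List.mem_flatMap] at hy
    obtain ⟨k, hk, hy⟩ := hy
    have hky : key y = k := by simpa using (List.mem_filter.mp hy).2
    simp only [hky, decide_eq_true_eq]
    exact h2 k hk
  · intro y hy
    rw [List.mem_flatMap] at hy
    obtain ⟨k, hk, hy⟩ := hy
    have hky : key y = k := by simpa using (List.mem_filter.mp hy).2
    simp only [hky, decide_eq_false_iff_not, not_lt]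
    exact h1 k hk

theorem pvStableSort {α : Type} (key : α → Int) (xs : List α) :
    PySem.List.sorted xs key true
    = (PySem.List.sorted (PySem.Set.ofList (xs.map key)) (fun x => x) true).flatMap
        (fun k => xs.filter (fun x => key x == k)) := by
  induction xs using List.reverseRecOn with
  | nil => rfl
  | append_singleton xs x ih =>
    have hL : PySem.List.sorted (xs ++ [x]) key true
        = PySem.List.insertBy (fun a b => decide (key b < key a)) x (PySem.List.sorted xs key true) := by
      rw [PySem.List.sorted_rev_eq_foldl_insertBy, PySem.List.sorted_rev_eq_foldl_insertBy (xs := xs),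
        List.foldl_append, List.foldl_cons, List.foldl_nil]
    have hK' : PySem.Set.ofList ((xs ++ [x]).map key)
        = PySem.Set.add (PySem.Set.ofList (xs.map key)) (key x) := by
      rw [List.map_append, PySem.Set.ofList_eq_foldl, List.foldl_append, ← PySem.Set.ofList_eq_foldl]
      simp
    set kx := key x with hkx
    set K := PySem.Set.ofList (xs.map key) with hK
    set S := PySem.List.sorted K (fun x => x) true with hSdef
    have hnd : S.Nodup := ((PySem.List.sorted_perm K (fun x => x) true).symm).nodup (PySem.Set.nodup_ofList _)
    have hdesc : S.Pairwise (fun a b => b < a) := by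
      have hle := PySem.List.sorted_pairwise_rev K (fun x => x)
      rw [← hSdef] at hle
      exact (hle.and hnd).imp (fun h => by omega)
    have hmemS : ∀ k, (k ∈ S ↔ k ∈ xs.map key) := fun k => by
      rw [hSdef, PySem.List.mem_sorted, hK, PySem.Set.mem_ofList]
    obtain ⟨S1, S2p, hS1, hS2p⟩ : ∃ S1 S2p, S1 = S.takeWhile (fun k => decide (kx < k)) ∧
        S2p = S.dropWhile (fun k => decide (kx < k)) := ⟨_, _, rfl, rfl⟩
    have hsplit : S1 ++ S2p = S := by rw [hS1, hS2p]; exact List.takeWhile_append_dropWhile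
    have h1 : ∀ k ∈ S1, kx < k := fun k hk => by
      rw [hS1] at hk; simpa using List.mem_takeWhile_imp hk
    have h2 : ∀ k ∈ S2p, k ≤ kx := by rw [hS2p]; exact pvDropWhileLe kx S hdesc
    have hdesc2 : S2p.Pairwise (fun a b => b < a) := by
      rw [hS2p]; exact List.Pairwise.sublist (List.dropWhile_sublist _) hdesc
    have hfilt : ∀ k, (xs ++ [x]).filter (fun y => key y == k)
        = xs.filter (fun y => key y == k) ++ (if kx == k then [x] else []) := by
      intro k
      rw [List.filter_append]
      congr 1
      rw [List.filter_cons]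
      simp [hkx]
    by_cases hmem : kx ∈ xs.map key
    · -- key already present: the distinct-key list is unchanged
      have hKadd : PySem.Set.add K kx = K := PySem.Set.add_of_mem (by rw [hK, PySem.Set.mem_ofList]; exact hmem)
      have hkxS : kx ∈ S := (hmemS kx).2 hmem
      rw [← hsplit] at hkxS
      have hkxS2p : kx ∈ S2p := by
        rcases List.mem_append.mp hkxS with h | h
        · exact absurd (h1 kx h) (lt_irrefl kx)
        · exact h
      obtain ⟨t, hS2pc⟩ : ∃ t, S2p = kx :: t := by
        cases hc : S2p with
        | nil => rw [hc] at hkxS2p; cases hkxS2p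
        | cons h0 t =>
          have hkxm := hc ▸ hkxS2p
          have hd2 := hc ▸ hdesc2
          rw [List.pairwise_cons] at hd2
          have hle : h0 ≤ kx := (hc ▸ h2) h0 (by simp)
          have hh0 : h0 = kx := by
            rcases List.mem_cons.mp hkxm with he | hin
            · omega
            · have := hd2.1 kx hin; omega
          exact ⟨t, by rw [hh0]⟩
      have ht : ∀ k ∈ t, k < kx := by
        have hd2 := hS2pc ▸ hdesc2
        rw [List.pairwise_cons] at hd2
        exact hd2.1
      rw [hL, ih, hK', hKadd, ← hSdef, ← hsplit, hS2pc]
      -- LHS: insert into the flattened groups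
      have lhs_eq : PySem.List.insertBy (fun a b => decide (key b < key a)) x
          ((S1 ++ kx :: t).flatMap (fun k => xs.filter (fun y => key y == k)))
          = (S1 ++ [kx]).flatMap (fun k => xs.filter (fun y => key y == k))
            ++ x :: t.flatMap (fun k => xs.filter (fun y => key y == k)) := by
        have hre : S1 ++ kx :: t = (S1 ++ [kx]) ++ t := by simp
        rw [hre, List.flatMap_append]
        exact pvInsertGrouped key xs x (S1 ++ [kx]) t
          (by intro k hk
              rcases List.mem_append.mp hk with h | h
              · exact le_of_lt (h1 k h)
              · simp at h; omega)
          ht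
      rw [lhs_eq]
      -- RHS: groups of xs ++ [x]
      conv_rhs => rw [List.flatMap_append, List.flatMap_cons]
      have hc1 : S1.flatMap (fun k => (xs ++ [x]).filter (fun y => key y == k))
          = S1.flatMap (fun k => xs.filter (fun y => key y == k)) :=
        List.flatMap_congr (fun k hk => by
          rw [hfilt k]; have := h1 k hk
          rw [if_neg (by simp; omega)]; simp)
      have hc2 : t.flatMap (fun k => (xs ++ [x]).filter (fun y => key y == k))
          = t.flatMap (fun k => xs.filter (fun y => key y == k)) :=
        List.flatMap_congr (fun k hk => by
          rw [hfilt k]; have := ht k hk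
          rw [if_neg (by simp; omega)]; simp)
      rw [hc1, hc2, hfilt kx, if_pos (by simp)]
      simp
    · -- new key: it is inserted into the distinct-key list
      have hKadd : PySem.Set.add K kx = K ++ [kx] :=
        PySem.Set.add_of_not_mem (by rw [hK, PySem.Set.mem_ofList]; exact hmem)
      have hkxS : kx ∉ S := fun h => hmem ((hmemS kx).1 h)
      have h2' : ∀ k ∈ S2p, k < kx := by
        intro k hk
        have hle := h2 k hk
        have : k ∈ S := by rw [← hsplit]; exact List.mem_append_right _ hk
        have : k ≠ kx := fun he => hkxS (he ▸ this)
        omega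
      have hS'eq : PySem.List.sorted (K ++ [kx]) (fun x => x) true = S1 ++ kx :: S2p := by
        rw [PySem.List.sorted_rev_eq_foldl_insertBy, List.foldl_append, List.foldl_cons, List.foldl_nil,
          ← PySem.List.sorted_rev_eq_foldl_insertBy, ← hSdef, ← hsplit]
        rw [pvInsertBySkip _ _ _ _ (fun k hk => by have := h1 k hk; simp; omega)]
        rw [pvInsertByFront _ _ _ (fun k hk => by have := h2' k hk; simp; omega)]
      have hfkx : xs.filter (fun y => key y == kx) = [] := by
        rw [List.filter_eq_nil_iff]
        intro y hy
        simp only [beq_iff_eq]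
        exact fun he => hmem (he ▸ List.mem_map_of_mem hy)
      rw [hL, ih, hK', hKadd, hS'eq, ← hsplit]
      have lhs_eq : PySem.List.insertBy (fun a b => decide (key b < key a)) x
          ((S1 ++ S2p).flatMap (fun k => xs.filter (fun y => key y == k)))
          = S1.flatMap (fun k => xs.filter (fun y => key y == k))
            ++ x :: S2p.flatMap (fun k => xs.filter (fun y => key y == k)) := by
        rw [List.flatMap_append]
        exact pvInsertGrouped key xs x S1 S2p (fun k hk => le_of_lt (h1 k hk)) h2'
      rw [lhs_eq]
      rw [List.flatMap_append, List.flatMap_cons]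
      have hc1 : S1.flatMap (fun k => (xs ++ [x]).filter (fun y => key y == k))
          = S1.flatMap (fun k => xs.filter (fun y => key y == k)) :=
        List.flatMap_congr (fun k hk => by
          rw [hfilt k]; have := h1 k hk
          rw [if_neg (by simp; omega)]; simp)
      have hc2 : S2p.flatMap (fun k => (xs ++ [x]).filter (fun y => key y == k))
          = S2p.flatMap (fun k => xs.filter (fun y => key y == k)) :=
        List.flatMap_congr (fun k hk => by
          rw [hfilt k]; have := h2' k hk
          rw [if_neg (by simp; omega)]; simp)
      rw [hc1, hc2, hfilt kx, hfkx, if_pos (by simp)]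
      simp

-- nested fold over the per-key groups = fold over the flattened list
theorem pvFoldlFlat {α β γ : Type} (L : List α) (g : α → List β) (f : γ → β → γ) (init : γ) :
    L.foldl (fun st k => (g k).foldl f st) init = (L.flatMap g).foldl f init := by
  induction L generalizing init with
  | nil => rfl
  | cons a t ih => simp [List.flatMap_cons, List.foldl_append, ih]

theorem pvMain (result : List (String × String × String × Int)) :
    resort result = resort_alt result := by
  simp only [resort, resort_alt]
  rw [pvDicKeys]
  have h1 : (PySem.List.sorted (PySem.Set.ofList (result.map (fun x => x.2.2.2))) (fun x => x) true).foldl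
      (fun (st : List (String × String × String × Int) × PySem.Dict String Int) k =>
        ((result.foldl (fun d k =>
            if !(d.contains k.2.2.2) then d.insert k.2.2.2 [k]
            else d.modify k.2.2.2 [] (fun l => l ++ [k])) PySem.Dict.empty).getD k []).foldl
          (fun st u =>
            if !(st.2.contains u.1) then (st.1 ++ [(u.1, u.2.1, u.2.2.1, k)], st.2.insert u.1 1)
            else st) st)
      ([], PySem.Dict.empty)
      = (PySem.List.sorted (PySem.Set.ofList (result.map (fun x => x.2.2.2))) (fun x => x) true).foldl
      (fun st k => (result.filter (fun x => x.2.2.2 == k)).foldl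
          (fun st u =>
            if !(st.2.contains u.1) then (st.1 ++ [(u.1, u.2.1, u.2.2.1, u.2.2.2)], st.2.insert u.1 1)
            else st) st)
      ([], PySem.Dict.empty) := by
    apply PySem.List.foldl_congr_mem
    intro st k _
    rw [pvDicGetD]
    apply PySem.List.foldl_congr_mem
    intro st2 u hu
    have hk : u.2.2.2 = k := by simpa using (List.mem_filter.mp hu).2
    rw [hk]
  rw [h1, pvFoldlFlat]
  have hstab := pvStableSort (fun x : String × String × String × Int => x.2.2.2) result
  rw [← hstab]
  exact pvPhase2 _ [] PySem.Dict.empty PySem.Set.empty rfl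

-- ===== VERDICT (by name: the statement is the Claim_ definition above) =====
theorem resort_spec : Claim_equal_resort := by
  intro result _
  unfold Spec_resort
  exact pvMain result
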